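-- pv_equiv track=rewrite | github.com/mdgufran0949-ux/discipline-bot | tools/fetch_discipline_trends.py | _extract_hot_keywords
-- ===== SOURCE A (Python) =====
-- HIGH_PERFORMING_KEYWORDS = [
--     "discipline", "focus", "lonely", "success", "grind", "sacrifice",
--     "procrastination", "lazy", "comfort", "weak", "regret", "clock",
--     "broke", "scared", "quit", "mirror", "chosen", "soft", "buried",
--     "accountability", "winning", "routine", "consistent", "delayed",
--     "distraction", "excuses", "fear", "pain", "price", "earn"
-- ]
--
-- def _extract_hot_keywords(titles: list[str]) -> list[str]:
--     """Find which HIGH_PERFORMING_KEYWORDS appear most in trending titles."""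
--     counts = {}
--     for kw in HIGH_PERFORMING_KEYWORDS:
--         count = sum(1 for t in titles if kw in t.lower())
--         if count > 0:
--             counts[kw] = count
--     sorted_kw = sorted(counts.items(), key=lambda x: x[1], reverse=True)
--     return [kw for kw, _ in sorted_kw[:10]]
-- ===== SOURCE B (Python) =====
-- HIGH_PERFORMING_KEYWORDS = [
--     "discipline", "focus", "lonely", "success", "grind", "sacrifice",
--     "procrastination", "lazy", "comfort", "weak", "regret", "clock",
--     "broke", "scared", "quit", "mirror", "chosen", "soft", "buried",
--     "accountability", "winning", "routine", "consistent", "delayed",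
--     "distraction", "excuses", "fear", "pain", "price", "earn"
-- ]
--
-- def _extract_hot_keywords(titles: list[str]) -> list[str]:
--     """Counting-sort selection: lowercase each title once, group the matching
--     keywords into buckets indexed by their count, then read the buckets out
--     from the highest possible count (len(titles)) down to 1 -- no comparison
--     sort at all. Within a bucket keywords keep list order, which reproduces
--     the stable tie-break."""
--     lows = [t.lower() for t in titles]
--     buckets = {}
--     for kw in HIGH_PERFORMING_KEYWORDS:
--         c = sum(1 for low in lows if kw in low)
--         if c > 0:
--             buckets[c] = buckets.get(c, []) + [kw]
--     result = []
--     for c in range(len(titles), 0, -1):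
--         result += buckets.get(c, [])
--     return result[:10]
-- ===== Notes on version B (the rewrite author's own statement) =====
-- stated objective: faster
-- what changed: B replaces A's comparison sort of the count dict by a counting-sort selection: it lowercases each title once (A lowercases every title once per keyword), groups keywords into buckets indexed by their count, and reads the buckets out from count len(titles) down to 1, slicing the first 10.
import Mathlib
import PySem

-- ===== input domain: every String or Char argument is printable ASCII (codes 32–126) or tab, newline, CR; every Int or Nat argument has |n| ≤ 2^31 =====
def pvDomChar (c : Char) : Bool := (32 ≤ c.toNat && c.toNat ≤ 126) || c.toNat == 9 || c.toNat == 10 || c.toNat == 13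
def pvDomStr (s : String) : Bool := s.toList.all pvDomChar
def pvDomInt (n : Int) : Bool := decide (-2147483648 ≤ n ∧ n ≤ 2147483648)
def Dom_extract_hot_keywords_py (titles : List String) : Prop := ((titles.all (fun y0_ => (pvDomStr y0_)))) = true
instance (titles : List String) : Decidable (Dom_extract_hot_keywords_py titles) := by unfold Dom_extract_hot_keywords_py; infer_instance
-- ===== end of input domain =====

-- B replaces A's comparison sort of the count dict by a counting-sort bucket readout
-- (each title lowercased once; buckets read from len(titles) down to 1); measured faster in a timing run.


def pvHigh : List String := [
  "discipline", "focus", "lonely", "success", "grind", "sacrifice",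
  "procrastination", "lazy", "comfort", "weak", "regret", "clock",
  "broke", "scared", "quit", "mirror", "chosen", "soft", "buried",
  "accountability", "winning", "routine", "consistent", "delayed",
  "distraction", "excuses", "fear", "pain", "price", "earn"]

-- ===== PORT A =====
def extract_hot_keywords_py (titles : List String) : List String :=
  let counts := pvHigh.foldl (fun counts kw =>
      let count : Int := titles.foldl
        (fun acc t => if PySem.Str.isIn kw (PySem.Str.lower t) then acc + 1 else acc) 0
      if count > 0 then counts.insert kw count else counts)
    (⟨[]⟩ : PySem.Dict String Int)
  let sorted_kw := PySem.List.sorted counts.items (fun x => x.2) true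
  (PySem.List.slice sorted_kw none (some 10)).map (fun p => p.1)

-- ===== PORT B =====
def extract_hot_keywords_py_alt (titles : List String) : List String :=
  let lows := titles.map (fun t => PySem.Str.lower t)
  let buckets := pvHigh.foldl (fun (b : PySem.Dict Int (List String)) kw =>
      let c : Int := lows.foldl (fun acc low => if PySem.Str.isIn kw low then acc + 1 else acc) 0
      if c > 0 then b.insert c (b.getD c [] ++ [kw]) else b)
    (⟨[]⟩ : PySem.Dict Int (List String))
  let result := (PySem.List.pyRange (titles.length : Int) 0 (-1)).foldl
      (fun res c => res ++ buckets.getD c []) []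
  PySem.List.slice result none (some 10)

-- ===== PRECONDITION & SPEC =====
def Spec_extract_hot_keywords_py (titles : List String) (out : List String) : Prop := out = extract_hot_keywords_py_alt titles
instance (titles : List String) (out : List String) : Decidable (Spec_extract_hot_keywords_py titles out) := by unfold Spec_extract_hot_keywords_py; infer_instance

-- ===== CLAIM (what is proved, stated in full; the proofs are below) =====
def Claim_equal_extract_hot_keywords_py : Prop := ∀ (titles : List String), Dom_extract_hot_keywords_py titles → Spec_extract_hot_keywords_py titles (extract_hot_keywords_py titles)

-- ===== LEMMAS AND PROOFS =====

-- the count both programs compute for a keyword: how many titles contain it (lowercased)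
def pvCnt (titles : List String) (kw : String) : Int :=
  (titles.countP (fun t => PySem.Str.isIn kw (PySem.Str.lower t)) : Int)

lemma pv_high_nodup : pvHigh.Nodup := by decide

-- A's dict is built by appending fresh keys in pvHigh order
lemma pv_itemsA (titles : List String) (l : List String) (d : PySem.Dict String Int)
    (hd : ∀ kw ∈ l, d.contains kw = false) (hnd : l.Nodup) :
    (l.foldl (fun counts kw =>
      if (titles.foldl
          (fun acc t => if PySem.Str.isIn kw (PySem.Str.lower t) then acc + 1 else acc) (0:Int)) > 0
      then counts.insert kw (titles.foldl
          (fun acc t => if PySem.Str.isIn kw (PySem.Str.lower t) then acc + 1 else acc) (0:Int))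
      else counts) d).items
    = d.items ++ (l.filter (fun kw => decide (pvCnt titles kw > 0))).map
        (fun kw => (kw, pvCnt titles kw)) := by
  induction l generalizing d with
  | nil => simp
  | cons kw l ih =>
    have hcnt : (titles.foldl
        (fun acc t => if PySem.Str.isIn kw (PySem.Str.lower t) then acc + 1 else acc) (0:Int))
        = pvCnt titles kw := by
      rw [PySem.List.foldl_count_if]; simp [pvCnt]
    have hkw : d.contains kw = false := hd kw (by simp)
    by_cases hpos : pvCnt titles kw > 0
    · simp only [List.foldl_cons, hcnt, if_pos hpos]
      rw [ih (d.insert kw (pvCnt titles kw))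
        (fun k hk => by
          rw [PySem.Dict.contains_insert]
          have hne : k ≠ kw := fun h => (List.nodup_cons.mp hnd).1 (h ▸ hk)
          simp [hne, hd k (List.mem_cons_of_mem _ hk)])
        (List.nodup_cons.mp hnd).2]
      simp [PySem.Dict.insert, hkw, hpos]
    · simp only [List.foldl_cons, hcnt, if_neg hpos]
      rw [ih d (fun k hk => hd k (List.mem_cons_of_mem _ hk)) (List.nodup_cons.mp hnd).2]
      simp [hpos]

-- insertBy passes over a block none of whose elements trigger the predicate
lemma pv_insertBy_append {α : Type} (p : α → α → Bool) (x : α) (l1 l2 : List α)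
    (h : ∀ b ∈ l1, p x b = false) :
    PySem.List.insertBy p x (l1 ++ l2) = l1 ++ PySem.List.insertBy p x l2 := by
  induction l1 with
  | nil => rfl
  | cons y l1 ih =>
    simp only [List.cons_append, PySem.List.insertBy, h y (by simp)]
    simp [ih (fun b hb => h b (List.mem_cons_of_mem _ hb))]

-- insertBy puts x in front when every element triggers the predicate
lemma pv_insertBy_front {α : Type} (p : α → α → Bool) (x : α) (l : List α)
    (h : ∀ b ∈ l, p x b = true) :
    PySem.List.insertBy p x l = x :: l := by
  cases l with
  | nil => rfl
  | cons y l => simp [PySem.List.insertBy, h y (by simp)]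

-- inserting one element into a bucket decomposition appends it to its own bucket
lemma pv_insertBy_flatMap {α : Type} (key : α → Int) (x : α) (cs : List Int)
    (f : Int → List α) (hcs : cs.Pairwise (fun a b => b < a)) (hx : key x ∈ cs)
    (hf : ∀ c ∈ cs, ∀ y ∈ f c, key y = c) :
    PySem.List.insertBy (fun a b => decide (key b < key a)) x (cs.flatMap f)
      = cs.flatMap (fun c => if c = key x then f c ++ [x] else f c) := by
  induction cs with
  | nil => simp at hx
  | cons c cs ih =>
    have hlt : ∀ c' ∈ cs, c' < c := fun c' hc' => (List.pairwise_cons.mp hcs).1 c' hc'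
    simp only [List.flatMap_cons]
    by_cases hc : c = key x
    · subst hc
      rw [pv_insertBy_append _ _ _ _ (fun b hb => by
          have hkb := hf (key x) (by simp) b hb; simp [hkb])]
      rw [pv_insertBy_front _ _ _ (fun b hb => by
          obtain ⟨c', hc', hbc'⟩ := List.mem_flatMap.mp hb
          have hkb := hf c' (List.mem_cons_of_mem _ hc') b hbc'
          simp [hkb, hlt c' hc'])]
      rw [if_pos rfl]
      have hrest : cs.flatMap (fun c' => if c' = key x then f c' ++ [x] else f c') = cs.flatMap f := by
        apply List.flatMap_congr
        intro c' hc'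
        exact if_neg (by have := hlt c' hc'; omega)
      rw [hrest]
      simp
    · have hxcs : key x ∈ cs := by
        rcases List.mem_cons.mp hx with h | h
        · exact absurd h.symm hc
        · exact h
      have hcgt : key x < c := hlt _ hxcs
      rw [pv_insertBy_append _ _ _ _ (fun b hb => by
          have := hf c (by simp) b hb
          simp [this]; omega)]
      rw [ih (List.pairwise_cons.mp hcs).2 hxcs
          (fun c' hc' => hf c' (List.mem_cons_of_mem _ hc'))]
      rw [if_neg hc]

-- the whole stable descending insertion sort is the bucket decomposition
lemma pv_foldl_insertBy_flatMap {α : Type} [DecidableEq α] (key : α → Int) (cs : List Int)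
    (hcs : cs.Pairwise (fun a b => b < a)) :
    ∀ (xs pref : List α), (∀ x ∈ xs, key x ∈ cs) →
    xs.foldl (fun acc x => PySem.List.insertBy (fun a b => decide (key b < key a)) x acc)
        (cs.flatMap (fun c => pref.filter (fun y => key y == c)))
      = cs.flatMap (fun c => (pref ++ xs).filter (fun y => key y == c)) := by
  intro xs
  induction xs with
  | nil => intro pref _; simp
  | cons x xs ih =>
    intro pref hxs
    simp only [List.foldl_cons]
    rw [pv_insertBy_flatMap key x cs _ hcs (hxs x (by simp))
        (fun c hc y hy => by
          have := List.mem_filter.mp hy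
          exact eq_of_beq this.2)]
    have hstep : (cs.flatMap (fun c =>
        if c = key x then pref.filter (fun y => key y == c) ++ [x]
        else pref.filter (fun y => key y == c)))
        = cs.flatMap (fun c => (pref ++ [x]).filter (fun y => key y == c)) := by
      apply List.flatMap_congr
      intro c _
      rw [List.filter_append]
      by_cases h : c = key x
      · rw [if_pos h]; subst h; simp
      · rw [if_neg h]
        have : key x ≠ c := fun hh => h hh.symm
        simp [this]
    rw [hstep, ih (pref ++ [x]) (fun a ha => hxs a (List.mem_cons_of_mem _ ha))]
    simp

-- push the pairing map through the insertion sort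
lemma pv_insertBy_map {α β : Type} (f : α → β) (pA : β → β → Bool) (pB : α → α → Bool)
    (h : ∀ a b, pA (f a) (f b) = pB a b) (x : α) (l : List α) :
    PySem.List.insertBy pA (f x) (l.map f) = (PySem.List.insertBy pB x l).map f := by
  induction l with
  | nil => rfl
  | cons y l ih =>
    simp only [List.map_cons, PySem.List.insertBy, h x y]
    split
    · rfl
    · simp [ih]

lemma pv_foldl_insertBy_map {α β : Type} (f : α → β) (pA : β → β → Bool) (pB : α → α → Bool)
    (h : ∀ a b, pA (f a) (f b) = pB a b) :
    ∀ (xs acc : List α),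
    (xs.map f).foldl (fun acc x => PySem.List.insertBy pA x acc) (acc.map f)
      = (xs.foldl (fun acc x => PySem.List.insertBy pB x acc) acc).map f := by
  intro xs
  induction xs with
  | nil => intro acc; rfl
  | cons x xs ih =>
    intro acc
    simp only [List.map_cons, List.foldl_cons]
    rw [pv_insertBy_map f pA pB h x acc]
    exact ih _

-- B's bucket dict: bucket c holds, in order, the keywords whose count is c (> 0)
lemma pv_buckets (g : String → Int) (l : List String) (d : PySem.Dict Int (List String)) (c : Int) :
    (l.foldl (fun b kw =>
        if g kw > 0 then b.insert (g kw) (b.getD (g kw) [] ++ [kw]) else b) d).getD c []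
      = d.getD c [] ++ l.filter (fun kw => decide (g kw > 0) && (g kw == c)) := by
  induction l generalizing d with
  | nil => simp
  | cons kw l ih =>
    simp only [List.foldl_cons, List.filter_cons]
    by_cases hpos : g kw > 0
    · rw [if_pos hpos, ih]
      rw [PySem.Dict.getD_insert]
      by_cases hc : g kw = c
      · subst hc; simp [hpos]
      · have : ¬ c = g kw := fun h => hc h.symm
        simp [this, hpos, hc]
    · rw [if_neg hpos, ih]
      simp [hpos]

-- count bound: a keyword's count lies in (0, len titles] when positive
lemma pv_cnt_le (titles : List String) (kw : String) :
    pvCnt titles kw ≤ (titles.length : Int) := by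
  unfold pvCnt
  exact_mod_cast List.countP_le_length

-- the countdown range is strictly descending
lemma pv_range_desc (n : Int) :
    (PySem.List.pyRange n 0 (-1)).Pairwise (fun a b => b < a) := by
  rw [PySem.List.pyRange_neg_one_eq_reverse, List.pairwise_reverse]
  exact PySem.List.pairwise_lt_pyRange_one _ _

-- ===== VERDICT (by name: the statement is the Claim_ definition above) =====
theorem extract_hot_keywords_py_spec : Claim_equal_extract_hot_keywords_py := by
  intro titles _
  unfold Spec_extract_hot_keywords_py extract_hot_keywords_py extract_hot_keywords_py_alt
  dsimp only []
  set n : Int := (titles.length : Int) with hn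
  set cs := PySem.List.pyRange n 0 (-1) with hcs
  set F := pvHigh.filter (fun kw => decide (pvCnt titles kw > 0)) with hF
  have hFmem : ∀ a ∈ F, a ∈ pvHigh := fun a ha => (List.mem_filter.mp ha).1
  have hFcs : ∀ kw ∈ F, pvCnt titles kw ∈ cs := by
    intro kw hkw
    rw [hcs, PySem.List.mem_pyRange_neg_one]
    have hpos := of_decide_eq_true (List.mem_filter.mp hkw).2
    exact ⟨hpos, pv_cnt_le titles kw⟩
  -- A side
  have hitems :
      (pvHigh.foldl (fun counts kw =>
        if (titles.foldl
            (fun acc t => if PySem.Str.isIn kw (PySem.Str.lower t) then acc + 1 else acc) (0:Int)) > 0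
        then counts.insert kw (titles.foldl
            (fun acc t => if PySem.Str.isIn kw (PySem.Str.lower t) then acc + 1 else acc) (0:Int))
        else counts) (⟨[]⟩ : PySem.Dict String Int)).items
      = F.map (fun kw => (kw, pvCnt titles kw)) := by
    rw [pv_itemsA titles pvHigh ⟨[]⟩ (fun _ _ => rfl) pv_high_nodup]
    rfl
  rw [hitems]
  have hsortA :
      PySem.List.sorted (F.map (fun kw => (kw, pvCnt titles kw))) (fun x => x.2) true
      = (cs.flatMap (fun c => F.filter (fun y => pvCnt titles y == c))).map
          (fun kw => (kw, pvCnt titles kw)) := by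
    rw [PySem.List.sorted_rev_eq_foldl_insertBy]
    have hmap := pv_foldl_insertBy_map (fun kw => (kw, pvCnt titles kw))
      (fun a b => decide (b.2 < a.2))
      (fun a b => decide (pvCnt titles b < pvCnt titles a)) (fun a b => rfl) F []
    simp only [List.map_nil] at hmap
    rw [hmap]
    have h0 := pv_foldl_insertBy_flatMap (pvCnt titles) cs (pv_range_desc n) F [] hFcs
    simp only [List.filter_nil] at h0
    have hnilbuck : (cs.flatMap (fun _ => ([] : List String))) = [] := by simp
    rw [hnilbuck] at h0
    simp only [List.nil_append] at h0
    rw [h0]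
  rw [hsortA]
  -- B side
  have hg : ∀ kw, ((titles.map (fun t => PySem.Str.lower t)).foldl
      (fun acc low => if PySem.Str.isIn kw low then acc + 1 else acc) (0:Int)) = pvCnt titles kw := by
    intro kw
    rw [List.foldl_map, PySem.List.foldl_count_if]
    simp [pvCnt]
  have hbuck : ∀ c : Int,
      (pvHigh.foldl (fun (b : PySem.Dict Int (List String)) kw =>
        if ((titles.map (fun t => PySem.Str.lower t)).foldl
            (fun acc low => if PySem.Str.isIn kw low then acc + 1 else acc) (0:Int)) > 0
        then b.insert ((titles.map (fun t => PySem.Str.lower t)).foldl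
            (fun acc low => if PySem.Str.isIn kw low then acc + 1 else acc) (0:Int))
            (b.getD ((titles.map (fun t => PySem.Str.lower t)).foldl
            (fun acc low => if PySem.Str.isIn kw low then acc + 1 else acc) (0:Int)) [] ++ [kw])
        else b) (⟨[]⟩ : PySem.Dict Int (List String))).getD c []
      = F.filter (fun y => pvCnt titles y == c) := by
    intro c
    have hcong : (pvHigh.foldl (fun (b : PySem.Dict Int (List String)) kw =>
        if ((titles.map (fun t => PySem.Str.lower t)).foldl
            (fun acc low => if PySem.Str.isIn kw low then acc + 1 else acc) (0:Int)) > 0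
        then b.insert ((titles.map (fun t => PySem.Str.lower t)).foldl
            (fun acc low => if PySem.Str.isIn kw low then acc + 1 else acc) (0:Int))
            (b.getD ((titles.map (fun t => PySem.Str.lower t)).foldl
            (fun acc low => if PySem.Str.isIn kw low then acc + 1 else acc) (0:Int)) [] ++ [kw])
        else b) (⟨[]⟩ : PySem.Dict Int (List String)))
        = (pvHigh.foldl (fun (b : PySem.Dict Int (List String)) kw =>
        if pvCnt titles kw > 0
        then b.insert (pvCnt titles kw) (b.getD (pvCnt titles kw) [] ++ [kw])
        else b) (⟨[]⟩ : PySem.Dict Int (List String))) := by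
      apply List.foldl_ext
      intro b kw _
      rw [hg kw]
    rw [hcong, pv_buckets (pvCnt titles) pvHigh ⟨[]⟩ c]
    rw [hF, List.filter_filter]
    simp [PySem.Dict.getD, PySem.Dict.get?, Bool.and_comm]
  have hsel : (cs.foldl (fun res c =>
      res ++ (pvHigh.foldl (fun (b : PySem.Dict Int (List String)) kw =>
        if ((titles.map (fun t => PySem.Str.lower t)).foldl
            (fun acc low => if PySem.Str.isIn kw low then acc + 1 else acc) (0:Int)) > 0
        then b.insert ((titles.map (fun t => PySem.Str.lower t)).foldl
            (fun acc low => if PySem.Str.isIn kw low then acc + 1 else acc) (0:Int))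
            (b.getD ((titles.map (fun t => PySem.Str.lower t)).foldl
            (fun acc low => if PySem.Str.isIn kw low then acc + 1 else acc) (0:Int)) [] ++ [kw])
        else b) (⟨[]⟩ : PySem.Dict Int (List String))).getD c []) [])
      = cs.flatMap (fun c => F.filter (fun y => pvCnt titles y == c)) := by
    rw [PySem.List.foldl_append_eq_flatMap]
    simp only [List.nil_append]
    apply List.flatMap_congr
    intro c _
    exact hbuck c
  rw [hsel]
  -- both are take 10 of the same list
  have hslice10 : ∀ (γ : Type) (xs : List γ),
      PySem.List.slice xs none (some 10) = xs.take 10 :=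
    fun γ xs => by rw [PySem.List.slice_to xs (by norm_num)]; rfl
  rw [hslice10, hslice10, ← List.map_take]
  simp [List.map_map, Function.comp_def]
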